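-- pv_equiv track=rewrite | github.com/FD2024/DocuRepo | linux/setup_src.py | build_file_patterns
-- ===== SOURCE A (Python) =====
-- from typing import Dict, List
--
-- def build_file_patterns(patterns: List[str]) -> str:
--     """Create a multi-line FILE_PATTERNS value."""
--     indent = " " * 25
--     lines: List[str] = []
--     for idx, pattern in enumerate(patterns):
--         suffix = " \\" if idx < len(patterns) - 1 else ""
--         prefix = "" if idx == 0 else indent
--         lines.append(f"{prefix}{pattern}{suffix}")
--     return "\n".join(lines)
-- ===== SOURCE B (Python) =====
-- from typing import List
--
--
-- def build_file_patterns(patterns: List[str]) -> str: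
--     """Create a multi-line FILE_PATTERNS value."""
--     sep = " \\\n" + " " * 25
--     return sep.join(patterns)
-- ===== Notes on version B (the rewrite author's own statement) =====
-- stated objective: simpler
-- what changed: Replaced the enumerate loop with conditional per-line prefix/suffix decoration by a single join on the constant separator ' \\\n' + 25 spaces; no loop, no index comparisons, no branches.
import Mathlib
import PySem

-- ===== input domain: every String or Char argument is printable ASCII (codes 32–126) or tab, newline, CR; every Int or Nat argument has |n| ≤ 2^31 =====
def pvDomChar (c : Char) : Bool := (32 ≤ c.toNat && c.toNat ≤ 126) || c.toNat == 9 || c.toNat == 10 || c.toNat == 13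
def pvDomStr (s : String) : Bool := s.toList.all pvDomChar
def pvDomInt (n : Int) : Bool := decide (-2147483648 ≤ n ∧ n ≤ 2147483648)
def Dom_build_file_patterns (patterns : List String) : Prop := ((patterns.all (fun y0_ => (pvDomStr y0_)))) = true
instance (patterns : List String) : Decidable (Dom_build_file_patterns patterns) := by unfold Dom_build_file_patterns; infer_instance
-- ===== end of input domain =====

-- B replaces A's enumerate loop with conditional prefix/suffix per line by one
-- join on the constant separator " \\\n" ++ 25 spaces (objective: simpler).

-- ===== PORT A =====
def build_file_patterns (patterns : List String) : String :=
  let indent : String := String.ofList (List.replicate 25 ' ')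
  let lines : List String :=
    (PySem.List.enumerate patterns).foldl
      (fun lines ip =>
        let suffix := if ip.1 < (patterns.length : Int) - 1 then " \\" else ""
        let prefix_ := if ip.1 = 0 then "" else indent
        lines ++ [prefix_ ++ ip.2 ++ suffix]) []
  PySem.Str.join "\n" lines

-- ===== PORT B =====
def build_file_patterns_alt (patterns : List String) : String :=
  let sep : String := " \\\n" ++ String.ofList (List.replicate 25 ' ')
  PySem.Str.join sep patterns

-- ===== PRECONDITION & SPEC =====
def Spec_build_file_patterns (patterns : List String) (out : String) : Prop := out = build_file_patterns_alt patterns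
instance (patterns : List String) (out : String) : Decidable (Spec_build_file_patterns patterns out) := by unfold Spec_build_file_patterns; infer_instance

-- ===== CLAIM (what is proved, stated in full; the proofs are below) =====
def Claim_equal_build_file_patterns : Prop := ∀ (patterns : List String), Dom_build_file_patterns patterns → Spec_build_file_patterns patterns (build_file_patterns patterns)

-- ===== LEMMAS AND PROOFS =====

theorem pv_join_cons (sep a : List Char) (l : List (List Char)) (h : l ≠ []) :
    PySem.Chars.join sep (a :: l) = a ++ sep ++ PySem.Chars.join sep l := by
  cases l with
  | nil => exact absurd rfl h
  | cons b bs => exact PySem.Chars.join_cons_cons sep a b bs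

/-- A's per-line decoration, at the level of char lists. -/
def pvDecor (ind suf : List Char) (n : Int) (p : Int × List Char) : List Char :=
  (if p.1 = 0 then [] else ind) ++ p.2 ++ (if p.1 < n - 1 then suf else [])

theorem pv_enumerate_map {α β : Type} (f : α → β) :
    ∀ (xs : List α) (s : Int),
      PySem.List.enumerate (xs.map f) s
        = (PySem.List.enumerate xs s).map (fun p => (p.1, f p.2)) := by
  intro xs
  induction xs with
  | nil => intro s; simp [PySem.List.enumerate_nil]
  | cons x rest ih =>
      intro s
      simp [PySem.List.enumerate_cons, ih (s + 1)]

/-- Tail part of the equivalence: from index `s ≥ 1` on, every line is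
    indented, and only the last (index `n - 1`) lacks the `" \\"` suffix. -/
theorem pv_tail (nl ind suf : List Char) (n : Int) :
    ∀ (xs : List (List Char)) (s : Int), 1 ≤ s → s + xs.length = n → xs ≠ [] →
      PySem.Chars.join nl ((PySem.List.enumerate xs s).map (pvDecor ind suf n))
        = ind ++ PySem.Chars.join (suf ++ nl ++ ind) xs := by
  intro xs
  induction xs with
  | nil => intro s _ _ h; exact absurd rfl h
  | cons q rest ih =>
      intro s hs hn _
      cases rest with
      | nil =>
          have hs0 : ¬ (s = 0) := by omega
          have hlt : ¬ (s < n - 1) := by simp at hn; omega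
          simp [PySem.List.enumerate_cons, PySem.List.enumerate_nil,
            PySem.Chars.join_singleton, pvDecor, hs0, hlt]
      | cons r rest' =>
          have hs0 : ¬ (s = 0) := by omega
          have hlt : s < n - 1 := by simp at hn; omega
          have hn' : s + 1 + (r :: rest').length = n := by simp at hn ⊢; omega
          rw [PySem.List.enumerate_cons]
          simp only [List.map_cons]
          rw [pv_join_cons _ _ _ (by simp [PySem.List.enumerate_cons])]
          rw [ih (s + 1) (by omega) hn' (by simp)]
          rw [pv_join_cons (suf ++ nl ++ ind) q (r :: rest') (by simp)]
          simp [pvDecor, hs0, hlt]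

/-- Joining A's decorated lines with `"\n"` equals joining the raw patterns
    with the combined separator `suf ++ nl ++ ind`. -/
theorem pv_top (nl ind suf : List Char) (xs : List (List Char)) :
    PySem.Chars.join nl ((PySem.List.enumerate xs 0).map (pvDecor ind suf (xs.length : Int)))
      = PySem.Chars.join (suf ++ nl ++ ind) xs := by
  cases xs with
  | nil => simp [PySem.List.enumerate_nil, PySem.Chars.join_nil]
  | cons p rest =>
      cases rest with
      | nil =>
          simp [PySem.List.enumerate_cons, PySem.List.enumerate_nil,
            PySem.Chars.join_singleton, pvDecor]
      | cons q rest' =>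
          rw [PySem.List.enumerate_cons]
          simp only [List.map_cons]
          rw [pv_join_cons _ _ _ (by simp [PySem.List.enumerate_cons])]
          simp only [zero_add]
          rw [pv_tail nl ind suf ((p :: q :: rest').length : Int) (q :: rest') 1
              (by omega) (by simp; omega) (by simp)]
          rw [pv_join_cons (suf ++ nl ++ ind) p (q :: rest') (by simp)]
          simp [pvDecor]

-- ===== VERDICT (by name: the statement is the Claim_ definition above) =====
theorem build_file_patterns_spec : Claim_equal_build_file_patterns := by
  intro patterns _
  unfold Spec_build_file_patterns build_file_patterns build_file_patterns_alt
  simp only []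
  rw [PySem.List.foldl_append_singleton_eq_map
    (f := fun ip : Int × String =>
      (if ip.1 = 0 then "" else String.ofList (List.replicate 25 ' ')) ++ ip.2 ++
      (if ip.1 < (patterns.length : Int) - 1 then " \\" else ""))]
  apply String.toList_inj.mp
  rw [PySem.Str.toList_join, PySem.Str.toList_join]
  have hmap :
      List.map String.toList
        ((PySem.List.enumerate patterns).map
          (fun ip : Int × String =>
            (if ip.1 = 0 then "" else String.ofList (List.replicate 25 ' ')) ++ ip.2 ++
            (if ip.1 < (patterns.length : Int) - 1 then " \\" else "")))
        = (PySem.List.enumerate (patterns.map String.toList)).map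
            (pvDecor (List.replicate 25 ' ') (" \\".toList) ((patterns.length : Int))) := by
    rw [pv_enumerate_map, List.map_map, List.map_map]
    apply List.map_congr_left
    intro p _
    simp [pvDecor, String.toList_append, apply_ite String.toList]
  rw [List.nil_append, hmap]
  have := pv_top ("\n".toList) (List.replicate 25 ' ') (" \\".toList)
      (patterns.map String.toList)
  simp only [List.length_map] at this
  rw [this]
  congr 1
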